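-- pv_equiv track=rewrite | github.com/SrirajPenjerla/CDP-PYTHON | PHASE-3/geeks_training.py | maximumPoints
-- ===== SOURCE A (Python) =====
-- def maximumPoints(points, n):
--     cache=[]
--     for i in range(n):
--         sub=[-1]*4
--         cache.append(sub)
--
--     def takeMax(day,prev):
--         if day == n:
--             return 0
--         elif cache[day][prev+1]!=-1:
--             return cache[day][prev+1]
--         ans=0
--         for i in range(3):
--             if i!= prev:
--                 currPoints=points[day][i]+takeMax(day+1,i)
--                 ans=max(ans,currPoints)
--         cache[day][prev+1] = ans
--         return ans
--     return takeMax(0,-1)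
-- ===== SOURCE B (Python) =====
-- def maximumPoints(points, n):
--     # bottom-up DP: dp[prev + 1] = best total from the current day onward given previous activity prev
--     dp = [0, 0, 0, 0]
--     for day in range(n - 1, -1, -1):
--         row = points[day]
--         dp = [max([0] + [row[i] + dp[i + 1] for i in range(3) if i != prev])
--               for prev in range(-1, 3)]
--     return dp[0]
-- ===== Notes on version B (the rewrite author's own statement) =====
-- stated objective: alternative
-- what changed: Replaces A's top-down memoized recursion (a mutable cache plus a nested recursive takeMax) with an iterative bottom-up DP that sweeps the days once, keeping only a 4-entry table indexed by the previous activity.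
import Mathlib
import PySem

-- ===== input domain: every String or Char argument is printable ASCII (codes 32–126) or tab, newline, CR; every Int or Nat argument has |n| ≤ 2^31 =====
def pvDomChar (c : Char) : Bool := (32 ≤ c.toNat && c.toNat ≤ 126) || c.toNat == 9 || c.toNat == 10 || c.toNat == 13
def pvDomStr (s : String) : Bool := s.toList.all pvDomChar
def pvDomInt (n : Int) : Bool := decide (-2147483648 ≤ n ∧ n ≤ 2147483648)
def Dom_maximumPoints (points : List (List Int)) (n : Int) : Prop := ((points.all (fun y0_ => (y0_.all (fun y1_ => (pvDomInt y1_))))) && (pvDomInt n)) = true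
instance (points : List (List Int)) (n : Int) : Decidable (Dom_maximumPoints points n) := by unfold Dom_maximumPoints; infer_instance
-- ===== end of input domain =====

-- B replaces A's top-down memoized recursion (mutable cache) by an iterative bottom-up DP
-- over a 4-entry table indexed by the previous activity (objective: alternative decomposition).


-- ===== PORT A =====
-- takeMax(day, prev) with the mutable cache threaded through as state; fuel = n - day
-- (the 'day == n' test is the fuel-0 case); 'for i in range(3)' is a foldl over [0, 1, 2]
-- whose body updates ans (the .1 component) and threads the cache (the .2 component).
def takeMaxA (points : List (List Int)) : Nat → Int → Int → List (List Int) → Int × List (List Int)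
  | 0, _, _, cache => (0, cache)
  | fuel+1, day, prev, cache =>
    let cv := PySem.List.pyGetD (PySem.List.pyGetD cache day []) (prev+1) (-1)
    if cv ≠ -1 then (cv, cache)
    else
      let step := fun (s : Int × List (List Int)) (i : Int) =>
        if i ≠ prev then
          let r := takeMaxA points fuel (day+1) i s.2
          (max s.1 (PySem.List.pyGetD (PySem.List.pyGetD points day []) i 0 + r.1), r.2)
        else s
      let s2 := [0, 1, 2].foldl step (0, cache)
      (s2.1, PySem.List.pySetD s2.2 day (PySem.List.pySetD (PySem.List.pyGetD s2.2 day []) (prev+1) s2.1))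

def maximumPoints (points : List (List Int)) (n : Int) : Int :=
  let cache := List.replicate n.toNat (List.replicate 4 (-1))
  (takeMaxA points n.toNat 0 (-1) cache).1

-- ===== PORT B =====
-- one loop iteration of B: dp = [max([0] + [row[i] + dp[i+1] for i in range(3) if i != prev]) for prev in range(-1, 3)]
def stepB (dp row : List Int) : List Int :=
  (PySem.List.pyRange (-1) 3 1).map (fun prev =>
    ((PySem.List.pyRange 0 3 1).filterMap (fun i =>
      if i ≠ prev then some (PySem.List.pyGetD row i 0 + PySem.List.pyGetD dp (i+1) 0)
      else none)).foldl max 0)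

def maximumPoints_alt (points : List (List Int)) (n : Int) : Int :=
  let dp := (PySem.List.pyRange (n-1) (-1) (-1)).foldl
    (fun dp day => stepB dp (PySem.List.pyGetD points day [])) [0, 0, 0, 0]
  PySem.List.pyGetD dp 0 0

-- ===== PRECONDITION & SPEC =====
-- Pre_ is exactly where Python A returns: n ≥ 0 (a negative n indexes the empty cache),
-- and each of the first n rows of points exists and has at least 3 entries (otherwise
-- points[day][i] raises IndexError).
def Pre_maximumPoints (points : List (List Int)) (n : Int) : Prop :=
  0 ≤ n ∧ n ≤ (points.length : Int) ∧ ∀ row ∈ points.take n.toNat, 3 ≤ row.length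
instance (points : List (List Int)) (n : Int) : Decidable (Pre_maximumPoints points n) := by
  unfold Pre_maximumPoints; infer_instance

def pvWitness_maximumPoints : List (List Int) × Int := ([[1, 2, 3], [3, 1, 1]], 2)

def Spec_maximumPoints (points : List (List Int)) (n : Int) (out : Int) : Prop := out = maximumPoints_alt points n
instance (points : List (List Int)) (n : Int) (out : Int) : Decidable (Spec_maximumPoints points n out) := by unfold Spec_maximumPoints; infer_instance

-- ===== CLAIM (what is proved, stated in full; the proofs are below) =====
def Claim_equal_maximumPoints : Prop := ∀ (points : List (List Int)) (n : Int), Dom_maximumPoints points n → Pre_maximumPoints points n → Spec_maximumPoints points n (maximumPoints points n)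

-- ===== LEMMAS AND PROOFS =====

-- reference: best points obtainable from the given remaining rows, previous activity prev
def gBest : List (List Int) → Int → Int
  | [], _ => 0
  | row :: rest, prev =>
    let a0 := if (0:Int) ≠ prev then max 0 (PySem.List.pyGetD row 0 0 + gBest rest 0) else 0
    let a1 := if (1:Int) ≠ prev then max a0 (PySem.List.pyGetD row 1 0 + gBest rest 1) else a0
    if (2:Int) ≠ prev then max a1 (PySem.List.pyGetD row 2 0 + gBest rest 2) else a1

def gTable (rest : List (List Int)) : List Int :=
  [gBest rest (-1), gBest rest 0, gBest rest 1, gBest rest 2]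

-- B's loop body maps the DP table for `rest` to the table for `row :: rest`
lemma stepB_gTable (row : List Int) (rest : List (List Int)) :
    stepB (gTable rest) row = gTable (row :: rest) := by
  rfl

-- the cache invariant: right length/shape, and every non-(-1) entry is already correct
def CacheOK (R : List (List Int)) (cache : List (List Int)) : Prop :=
  cache.length = R.length ∧ ∀ d : Nat, d < R.length →
    (cache.getD d []).length = 4 ∧ ∀ p : Nat, p < 4 →
      (cache.getD d []).getD p (-1) = -1 ∨
      (cache.getD d []).getD p (-1) = gBest (R.drop d) ((p:Int) - 1)

lemma CacheOK_set (R cache : List (List Int)) (hok : CacheOK R cache)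
    (d p : Nat) (hd : d < R.length) (hp : p < 4) (v : Int)
    (hv : v = gBest (R.drop d) ((p:Int) - 1)) :
    CacheOK R (cache.set d ((cache.getD d []).set p v)) := by
  obtain ⟨hlen, hent⟩ := hok
  refine ⟨by simp [hlen], ?_⟩
  intro d' hd'
  have hdc : d < cache.length := by omega
  by_cases hdd : d' = d
  · subst hdd
    have hget : (cache.set d' ((cache.getD d' []).set p v)).getD d' [] =
        (cache.getD d' []).set p v := by
      rw [List.getD_eq_getElem?_getD, List.getElem?_set_self hdc]; rfl
    rw [hget]
    have hrl : (cache.getD d' []).length = 4 := (hent d' hd').1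
    refine ⟨by rw [List.length_set, hrl], ?_⟩
    intro p' hp'
    by_cases hpp : p' = p
    · subst hpp
      right
      rw [List.getD_eq_getElem?_getD, List.getElem?_set_self (by omega), Option.getD_some, hv]
    · have : ((cache.getD d' []).set p v).getD p' (-1) = (cache.getD d' []).getD p' (-1) := by
        rw [List.getD_eq_getElem?_getD, List.getElem?_set_ne (by omega),
          ← List.getD_eq_getElem?_getD]
      rw [this]
      exact (hent d' hd').2 p' hp'
  · have hget : (cache.set d ((cache.getD d []).set p v)).getD d' [] = cache.getD d' [] := by
      rw [List.getD_eq_getElem?_getD, List.getElem?_set_ne (by omega), ← List.getD_eq_getElem?_getD]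
    rw [hget]
    exact hent d' hd'


-- the unrolled 'for i in range(3)' loop of A computes gBest of (current row :: rest)
-- and keeps the cache invariant, given the induction hypothesis for the next day
lemma chainA (points R : List (List Int)) (fuel : Nat) (day prev : Int)
    (cache : List (List Int)) (hp1 : -1 ≤ prev) (hp2 : prev ≤ 2)
    (IH : ∀ (i : Int) (c : List (List Int)), -1 ≤ i → i ≤ 2 → CacheOK R c →
      (takeMaxA points fuel (day+1) i c).1 = gBest (R.drop (day.toNat+1)) i ∧
      CacheOK R (takeMaxA points fuel (day+1) i c).2)
    (hok : CacheOK R cache) :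
    (([0,1,2].foldl (fun (s : Int × List (List Int)) (i : Int) =>
      if i ≠ prev then
        (max s.1 (PySem.List.pyGetD (PySem.List.pyGetD points day []) i 0 +
          (takeMaxA points fuel (day+1) i s.2).1), (takeMaxA points fuel (day+1) i s.2).2)
      else s) (0, cache))).1
      = gBest (PySem.List.pyGetD points day [] :: R.drop (day.toNat+1)) prev ∧
    CacheOK R (([0,1,2].foldl (fun (s : Int × List (List Int)) (i : Int) =>
      if i ≠ prev then
        (max s.1 (PySem.List.pyGetD (PySem.List.pyGetD points day []) i 0 +
          (takeMaxA points fuel (day+1) i s.2).1), (takeMaxA points fuel (day+1) i s.2).2)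
      else s) (0, cache))).2 := by
  simp only [List.foldl_cons, List.foldl_nil, gBest]
  interval_cases prev
  · -- prev = -1 : all three branches taken
    norm_num
    obtain ⟨hv0, hc0⟩ := IH 0 cache (by omega) (by omega) hok
    obtain ⟨hv1, hc1⟩ := IH 1 _ (by omega) (by omega) hc0
    obtain ⟨hv2, hc2⟩ := IH 2 _ (by omega) (by omega) hc1
    rw [hv0, hv1, hv2]
    exact ⟨rfl, hc2⟩
  · -- prev = 0
    norm_num
    obtain ⟨hv1, hc1⟩ := IH 1 cache (by omega) (by omega) hok
    obtain ⟨hv2, hc2⟩ := IH 2 _ (by omega) (by omega) hc1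
    rw [hv1, hv2]
    exact ⟨rfl, hc2⟩
  · -- prev = 1
    norm_num
    obtain ⟨hv0, hc0⟩ := IH 0 cache (by omega) (by omega) hok
    obtain ⟨hv2, hc2⟩ := IH 2 _ (by omega) (by omega) hc0
    rw [hv0, hv2]
    exact ⟨rfl, hc2⟩
  · -- prev = 2
    norm_num
    obtain ⟨hv0, hc0⟩ := IH 0 cache (by omega) (by omega) hok
    obtain ⟨hv1, hc1⟩ := IH 1 _ (by omega) (by omega) hc0
    rw [hv0, hv1]
    exact ⟨rfl, hc1⟩

-- writing the freshly computed answer into the cache keeps the invariant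
lemma writeOK (R : List (List Int)) (s2c : List (List Int)) (day prev v : Int)
    (hd0 : 0 ≤ day) (hdR : day.toNat < R.length)
    (hp1 : -1 ≤ prev) (hp2 : prev ≤ 2)
    (hok : CacheOK R s2c)
    (hv : v = gBest (R.drop day.toNat) prev) :
    CacheOK R (PySem.List.pySetD s2c day
      (PySem.List.pySetD (PySem.List.pyGetD s2c day []) (prev+1) v)) := by
  have hlen : s2c.length = R.length := hok.1
  have hget : PySem.List.pyGetD s2c day [] = s2c.getD day.toNat [] :=
    PySem.List.pyGetD_of_nonneg _ _ hd0
  rw [hget, PySem.List.pySetD_of_nonneg _ _ hd0,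
    PySem.List.pySetD_of_nonneg _ _ (by omega : (0:Int) ≤ prev+1)]
  exact CacheOK_set R s2c hok day.toNat (prev+1).toNat hdR (by omega) v
    (by rw [show (((prev+1).toNat : Int)) - 1 = prev by omega]; exact hv)

-- main invariant lemma for A's recursion
lemma takeMaxA_ok (points : List (List Int)) (n : Int) (hn0 : 0 ≤ n)
    (hnl : n ≤ (points.length : Int)) :
    ∀ (fuel : Nat) (day prev : Int) (cache : List (List Int)),
      0 ≤ day → day + fuel = n → -1 ≤ prev → prev ≤ 2 →
      CacheOK (points.take n.toNat) cache →
      (takeMaxA points fuel day prev cache).1 = gBest ((points.take n.toNat).drop day.toNat) prev ∧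
      CacheOK (points.take n.toNat) (takeMaxA points fuel day prev cache).2 := by
  intro fuel
  induction fuel with
  | zero =>
    intro day prev cache hd0 hdn hp1 hp2 hok
    have hday : day.toNat = n.toNat := by omega
    have hR : ((points.take n.toNat).drop day.toNat) = [] := by
      apply List.drop_of_length_le
      rw [List.length_take]; omega
    simp [takeMaxA, hR, gBest, hok]
  | succ fuel IH =>
    intro day prev cache hd0 hdn hp1 hp2 hok
    have hRlen : (points.take n.toNat).length = n.toNat := by rw [List.length_take]; omega
    have hdlt : day.toNat < n.toNat := by omega
    have hdR : day.toNat < (points.take n.toNat).length := by omega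
    have hdc : day.toNat < cache.length := by rw [hok.1]; omega
    have hlen4 : (cache.getD day.toNat []).length = 4 := (hok.2 day.toNat hdR).1
    have hcache0 : PySem.List.pyGetD cache day [] = cache.getD day.toNat [] :=
      PySem.List.pyGetD_of_nonneg _ _ hd0
    have hcv : PySem.List.pyGetD (cache.getD day.toNat []) (prev+1) (-1)
        = (cache.getD day.toNat []).getD (prev+1).toNat (-1) :=
      PySem.List.pyGetD_of_nonneg _ _ (by omega)
    have hdisj := (hok.2 day.toNat hdR).2 (prev+1).toNat (by omega)
    rw [show (((prev+1).toNat : Int)) - 1 = prev by omega] at hdisj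
    have hrowp : PySem.List.pyGetD points day [] = (points.take n.toNat)[day.toNat]'hdR := by
      rw [PySem.List.pyGetD_eq_getElem points [] hd0 (by omega : day < (points.length : Int))]
      exact List.getElem_take.symm
    have hRd : (points.take n.toNat).drop day.toNat
        = PySem.List.pyGetD points day [] :: (points.take n.toNat).drop (day.toNat+1) := by
      rw [List.drop_eq_getElem_cons hdR, hrowp]
    simp only [takeMaxA]
    rw [hcache0, hcv]
    by_cases hm : (cache.getD day.toNat []).getD (prev+1).toNat (-1) = -1
    · rw [if_neg (not_not_intro hm)]
      have IH' : ∀ (i : Int) (c : List (List Int)), -1 ≤ i → i ≤ 2 →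
          CacheOK (points.take n.toNat) c →
          (takeMaxA points fuel (day+1) i c).1
            = gBest ((points.take n.toNat).drop (day.toNat+1)) i ∧
          CacheOK (points.take n.toNat) (takeMaxA points fuel (day+1) i c).2 := by
        intro i c hi1 hi2 hc
        have h := IH (day+1) i c (by omega) (by omega) hi1 hi2 hc
        rwa [show (day+1).toNat = day.toNat + 1 by omega] at h
      have hchain := chainA points (points.take n.toNat) fuel day prev cache hp1 hp2 IH' hok
      refine ⟨?_, ?_⟩
      · rw [hRd]
        exact hchain.1
      · have hv := hchain.1
        rw [← hRd] at hv
        exact writeOK (points.take n.toNat) _ day prev _ hd0 hdR hp1 hp2 hchain.2 hv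
    · rw [if_pos hm]
      rcases hdisj with h | h
      · exact absurd h hm
      · exact ⟨h, hok⟩

-- B's fold builds the DP table bottom-up
lemma foldB (points : List (List Int)) (n : Int) (hn0 : 0 ≤ n)
    (hnl : n ≤ (points.length : Int)) :
    ∀ (m : Nat), (m : Int) ≤ n →
      (PySem.List.pyRange ((m:Int) - 1) (-1) (-1)).foldl
        (fun dp day => stepB dp (PySem.List.pyGetD points day []))
        (gTable ((points.take n.toNat).drop m))
      = gTable (points.take n.toNat) := by
  intro m
  induction m with
  | zero => intro _; rw [PySem.List.pyRange_neg_one_eq_nil (by omega)]; simp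
  | succ m IH =>
    intro hm
    have hmn : m < n.toNat := by omega
    have hml : m < (points.take n.toNat).length := by rw [List.length_take]; omega
    have hmp : m < points.length := by omega
    rw [show ((m+1:Nat):Int) - 1 = (m:Int) by push_cast; ring]
    rw [PySem.List.pyRange_neg_one_cons (by omega)]
    rw [List.foldl_cons]
    have hrow : PySem.List.pyGetD points (m:Int) [] = (points.take n.toNat)[m] := by
      rw [PySem.List.pyGetD_natCast, List.getD_eq_getElem _ _ hmp, List.getElem_take]
    have hdrop : (points.take n.toNat).drop m = (points.take n.toNat)[m] :: (points.take n.toNat).drop (m+1) :=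
      List.drop_eq_getElem_cons hml
    rw [hrow, stepB_gTable, ← hdrop]
    exact IH (by omega)

lemma alt_eq (points : List (List Int)) (n : Int) (hn0 : 0 ≤ n)
    (hnl : n ≤ (points.length : Int)) :
    maximumPoints_alt points n = gBest (points.take n.toNat) (-1) := by
  unfold maximumPoints_alt
  have hdrop : ((points.take n.toNat).drop n.toNat) = [] := by
    apply List.drop_of_length_le
    rw [List.length_take]; omega
  have h := foldB points n hn0 hnl n.toNat (by omega)
  rw [hdrop] at h
  rw [show n - 1 = ((n.toNat:Nat):Int) - 1 by omega]
  rw [show (gTable [] : List Int) = [0,0,0,0] from rfl] at h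
  rw [h]
  rfl

-- ===== VERDICT (by name: the statement is the Claim_ definition above) =====
theorem maximumPoints_spec : Claim_equal_maximumPoints := by
  intro points n _ hpre
  obtain ⟨hn0, hnl, _⟩ := hpre
  unfold Spec_maximumPoints maximumPoints
  have hok : CacheOK (points.take n.toNat) (List.replicate n.toNat (List.replicate 4 (-1))) := by
    constructor
    · rw [List.length_replicate, List.length_take]; omega
    · intro d hd
      have hdn : d < n.toNat := by
        rw [List.length_take] at hd; omega
      rw [List.getD_eq_getElem _ _ (by rwa [List.length_replicate]), List.getElem_replicate]
      refine ⟨by simp, ?_⟩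
      intro p hp
      left
      rw [List.getD_eq_getElem _ _ (by rwa [List.length_replicate]), List.getElem_replicate]
  have h := takeMaxA_ok points n hn0 hnl n.toNat 0 (-1)
    (List.replicate n.toNat (List.replicate 4 (-1))) le_rfl (by omega) (by omega) (by omega) hok
  rw [h.1]
  rw [alt_eq points n hn0 hnl]
  simp
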